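-- pv_equiv track=rewrite | github.com/Danderson123/Amira | amira/construct_graph.py | split_into_contiguous_chunks
-- ===== SOURCE A (Python) =====
-- def split_into_contiguous_chunks(
--     shared_read_indices_with_lcp, shared_read_indices_with_hcp
-- ):
--     if not shared_read_indices_with_lcp:
--         return []
--     # Initialize the list of chunks with the first number
--     chunks = []
--     current_chunk = [shared_read_indices_with_lcp[0]]
--     # Iterate through the numbers starting from the second element
--     for i in range(1, len(shared_read_indices_with_lcp)):
--         # Check if the current number is contiguous with the last number in the current chunk
--         if shared_read_indices_with_lcp[i] == shared_read_indices_with_lcp[i - 1] + 1: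
--             current_chunk.append(shared_read_indices_with_lcp[i])
--         else:
--             if shared_read_indices_with_lcp[i] - 1 in shared_read_indices_with_hcp:
--                 current_chunk += [
--                     shared_read_indices_with_lcp[i] - 1,
--                     shared_read_indices_with_lcp[i],
--                 ]
--             else:
--                 chunks.append(current_chunk)
--                 current_chunk = [shared_read_indices_with_lcp[i]]
--     # Add the last chunk to the list
--     chunks.append(current_chunk)
--     return chunks
-- ===== SOURCE B (Python) =====
-- def split_into_contiguous_chunks(
--     shared_read_indices_with_lcp, shared_read_indices_with_hcp
-- ):
--     if not shared_read_indices_with_lcp: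
--         return []
--     # Pass 1: decompose into maximal contiguous runs of consecutive integers
--     runs = []
--     run = [shared_read_indices_with_lcp[0]]
--     prev = shared_read_indices_with_lcp[0]
--     for x in shared_read_indices_with_lcp[1:]:
--         if x == prev + 1:
--             run.append(x)
--         else:
--             runs.append(run)
--             run = [x]
--         prev = x
--     runs.append(run)
--     # Pass 2: merge runs whose gap is bridged via hcp (inserting b-1)
--     result = []
--     current = runs[0]
--     for r in runs[1:]:
--         b = r[0]
--         if b - 1 in shared_read_indices_with_hcp:
--             current = current + [b - 1] + r
--         else:
--             result.append(current)
--             current = r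
--     result.append(current)
--     return result
-- ===== Notes on version B (the rewrite author's own statement) =====
-- stated objective: alternative
-- what changed: Replaces A's single index-based scan with interleaved chunk decisions by a two-pass decomposition: first split the list into maximal runs of consecutive integers, then a second pass merges adjacent runs (inserting b-1) when the gap is bridged by shared_read_indices_with_hcp.
import Mathlib
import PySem

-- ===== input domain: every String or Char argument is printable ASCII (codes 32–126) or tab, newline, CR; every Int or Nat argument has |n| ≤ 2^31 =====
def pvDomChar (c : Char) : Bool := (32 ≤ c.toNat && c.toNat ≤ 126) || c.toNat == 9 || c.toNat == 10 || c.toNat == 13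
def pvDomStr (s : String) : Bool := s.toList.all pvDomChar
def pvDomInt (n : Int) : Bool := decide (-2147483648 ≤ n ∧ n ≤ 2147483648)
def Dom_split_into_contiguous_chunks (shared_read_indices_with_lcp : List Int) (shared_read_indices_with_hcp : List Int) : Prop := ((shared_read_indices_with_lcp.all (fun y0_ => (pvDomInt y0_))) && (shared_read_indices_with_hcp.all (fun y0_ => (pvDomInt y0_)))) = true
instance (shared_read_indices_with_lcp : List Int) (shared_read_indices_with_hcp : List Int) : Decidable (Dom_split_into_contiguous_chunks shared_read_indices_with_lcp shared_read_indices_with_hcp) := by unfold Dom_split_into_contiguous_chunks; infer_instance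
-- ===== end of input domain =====

-- B replaces A's single interleaved scan with a two-pass decomposition (maximal
-- consecutive runs, then merging runs bridged via hcp); alternative structure, same cost.

-- ===== PORT A =====
-- A's loop over i = 1..len-1; state (chunks, current_chunk), prev = lcp[i-1].
def pvALoop (hcp : List Int) : List Int → Int → List (List Int) × List Int → List (List Int) × List Int
  | [], _, st => st
  | x :: rest, prev, (chunks, cur) =>
    if x = prev + 1 then pvALoop hcp rest x (chunks, cur ++ [x])
    else if (x - 1) ∈ hcp then pvALoop hcp rest x (chunks, cur ++ [x - 1, x])
    else pvALoop hcp rest x (chunks ++ [cur], [x])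

def split_into_contiguous_chunks (shared_read_indices_with_lcp : List Int) (shared_read_indices_with_hcp : List Int) : List (List Int) :=
  match shared_read_indices_with_lcp with
  | [] => []
  | x :: rest =>
    let st := pvALoop shared_read_indices_with_hcp rest x ([], [x])
    st.1 ++ [st.2]

-- ===== PORT B =====
-- Pass 1 of Source B: maximal runs of consecutive integers, state (runs, run, prev).
def pvBRuns : List Int → List (List Int) → List Int → Int → List (List Int)
  | [], runs, run, _ => runs ++ [run]
  | x :: rest, runs, run, prev =>
    if x = prev + 1 then pvBRuns rest runs (run ++ [x]) x
    else pvBRuns rest (runs ++ [run]) [x] x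

-- Pass 2 of Source B: merge runs bridged via hcp; b = r[0] (runs are never empty).
def pvBMerge (hcp : List Int) : List (List Int) → List (List Int) → List Int → List (List Int)
  | [], result, current => result ++ [current]
  | r :: rest, result, current =>
    let b := r.headD 0
    if (b - 1) ∈ hcp then pvBMerge hcp rest result (current ++ [b - 1] ++ r)
    else pvBMerge hcp rest (result ++ [current]) r

def split_into_contiguous_chunks_alt (shared_read_indices_with_lcp : List Int) (shared_read_indices_with_hcp : List Int) : List (List Int) :=
  match shared_read_indices_with_lcp with
  | [] => []
  | x :: rest =>
    match pvBRuns rest [] [x] x with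
    | [] => []
    | r :: rs => pvBMerge shared_read_indices_with_hcp rs [] r

-- ===== PRECONDITION & SPEC =====
def Spec_split_into_contiguous_chunks (shared_read_indices_with_lcp : List Int) (shared_read_indices_with_hcp : List Int) (out : List (List Int)) : Prop := out = split_into_contiguous_chunks_alt shared_read_indices_with_lcp shared_read_indices_with_hcp
instance (shared_read_indices_with_lcp : List Int) (shared_read_indices_with_hcp : List Int) (out : List (List Int)) : Decidable (Spec_split_into_contiguous_chunks shared_read_indices_with_lcp shared_read_indices_with_hcp out) := by unfold Spec_split_into_contiguous_chunks; infer_instance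

-- ===== CLAIM (what is proved, stated in full; the proofs are below) =====
def Claim_equal_split_into_contiguous_chunks : Prop := ∀ (shared_read_indices_with_lcp : List Int) (shared_read_indices_with_hcp : List Int), Dom_split_into_contiguous_chunks shared_read_indices_with_lcp shared_read_indices_with_hcp → Spec_split_into_contiguous_chunks shared_read_indices_with_lcp shared_read_indices_with_hcp (split_into_contiguous_chunks shared_read_indices_with_lcp shared_read_indices_with_hcp)

-- ===== LEMMAS AND PROOFS =====

theorem pvBRuns_acc : ∀ (xs : List Int) (runs : List (List Int)) (run : List Int) (prev : Int),
    pvBRuns xs runs run prev = runs ++ pvBRuns xs [] run prev := by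
  intro xs
  induction xs with
  | nil => intro runs run prev; simp [pvBRuns]
  | cons x rest ih =>
    intro runs run prev
    by_cases h : x = prev + 1
    · simp only [pvBRuns, if_pos h]
      exact ih runs (run ++ [x]) x
    · simp only [pvBRuns, if_neg h, List.nil_append]
      rw [ih (runs ++ [run]) [x] x, ih [run] [x] x]
      simp

theorem pv_headD_append (run : List Int) (x : Int) (h : run ≠ []) :
    (run ++ [x]).headD 0 = run.headD 0 := by
  cases run with
  | nil => exact absurd rfl h
  | cons a t => simp

-- invariant: mid-run, A's state is B's merge state with the pending run already
-- bridged or flushed (A decides each boundary when the run starts, B when merging).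
theorem pv_L (hcp : List Int) : ∀ (xs : List Int) (prev : Int) (run : List Int)
    (resultB : List (List Int)) (currentB : List Int), run ≠ [] →
    (pvALoop hcp xs prev (if (run.headD 0 - 1) ∈ hcp then (resultB, currentB ++ (run.headD 0 - 1) :: run) else (resultB ++ [currentB], run))).1
      ++ [(pvALoop hcp xs prev (if (run.headD 0 - 1) ∈ hcp then (resultB, currentB ++ (run.headD 0 - 1) :: run) else (resultB ++ [currentB], run))).2]
    = pvBMerge hcp (pvBRuns xs [] run prev) resultB currentB := by
  intro xs
  induction xs with
  | nil =>
    intro prev run resultB currentB _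
    simp only [pvBRuns, List.nil_append, pvBMerge, pvALoop]
    split_ifs with hc <;> simp
  | cons x rest ih =>
    intro prev run resultB currentB hrun
    by_cases hx : x = prev + 1
    · -- run extension on both sides
      have hr : pvBRuns (x :: rest) [] run prev = pvBRuns rest [] (run ++ [x]) x := by
        simp only [pvBRuns, if_pos hx]
      rw [hr]
      have hthis := ih x (run ++ [x]) resultB currentB (by simp)
      rw [pv_headD_append run x hrun] at hthis
      by_cases hc : (run.headD 0 - 1) ∈ hcp
      · simp only [if_pos hc] at hthis ⊢
        simp only [pvALoop, if_pos hx]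
        simpa [List.append_assoc] using hthis
      · simp only [if_neg hc] at hthis ⊢
        simp only [pvALoop, if_pos hx]
        simpa [List.append_assoc] using hthis
    · -- run boundary
      have hrest : pvBRuns (x :: rest) [] run prev = run :: pvBRuns rest [] [x] x := by
        simp only [pvBRuns, if_neg hx, List.nil_append]
        rw [pvBRuns_acc rest [run] [x] x]
        simp
      rw [hrest]
      simp only [pvBMerge]
      by_cases hc : (run.headD 0 - 1) ∈ hcp
      · simp only [if_pos hc, pvALoop, if_neg hx]
        by_cases hc2 : (x - 1) ∈ hcp
        · have hthis := ih x [x] resultB (currentB ++ (run.headD 0 - 1) :: run) (by simp)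
          simp only [List.headD_cons, if_pos hc2] at hthis ⊢
          simpa [List.append_assoc] using hthis
        · have hthis := ih x [x] resultB (currentB ++ (run.headD 0 - 1) :: run) (by simp)
          simp only [List.headD_cons, if_neg hc2] at hthis ⊢
          simpa [List.append_assoc] using hthis
      · simp only [if_neg hc, pvALoop, if_neg hx]
        by_cases hc2 : (x - 1) ∈ hcp
        · have hthis := ih x [x] (resultB ++ [currentB]) run (by simp)
          simp only [List.headD_cons, if_pos hc2] at hthis ⊢
          simpa [List.append_assoc] using hthis
        · have hthis := ih x [x] (resultB ++ [currentB]) run (by simp)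
          simp only [List.headD_cons, if_neg hc2] at hthis ⊢
          simpa [List.append_assoc] using hthis

theorem pv_L0 (hcp : List Int) : ∀ (xs : List Int) (prev : Int) (run : List Int), run ≠ [] →
    (pvALoop hcp xs prev ([], run)).1 ++ [(pvALoop hcp xs prev ([], run)).2]
    = (match pvBRuns xs [] run prev with
       | [] => []
       | r :: rs => pvBMerge hcp rs [] r) := by
  intro xs
  induction xs with
  | nil => intro prev run _; simp [pvALoop, pvBRuns, pvBMerge]
  | cons x rest ih =>
    intro prev run hrun
    by_cases hx : x = prev + 1
    · have hr : pvBRuns (x :: rest) [] run prev = pvBRuns rest [] (run ++ [x]) x := by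
        simp only [pvBRuns, if_pos hx]
      rw [hr]
      simp only [pvALoop, if_pos hx]
      exact ih x (run ++ [x]) (by simp)
    · have hrest : pvBRuns (x :: rest) [] run prev = run :: pvBRuns rest [] [x] x := by
        simp only [pvBRuns, if_neg hx, List.nil_append]
        rw [pvBRuns_acc rest [run] [x] x]
        simp
      rw [hrest]
      have hthis := pv_L hcp rest x [x] [] run (by simp)
      simp only [List.headD_cons] at hthis
      simp only [pvALoop, if_neg hx]
      by_cases hc2 : (x - 1) ∈ hcp
      · simp only [if_pos hc2] at hthis ⊢
        simpa using hthis
      · simp only [if_neg hc2] at hthis ⊢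
        simpa using hthis

-- ===== VERDICT (by name: the statement is the Claim_ definition above) =====
theorem split_into_contiguous_chunks_spec : Claim_equal_split_into_contiguous_chunks := by
  intro lcp hcp _
  unfold Spec_split_into_contiguous_chunks
  cases lcp with
  | nil => rfl
  | cons x rest =>
    simp only [split_into_contiguous_chunks, split_into_contiguous_chunks_alt]
    exact pv_L0 hcp rest x [x] (by simp)
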